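-- pv_equiv track=rewrite | github.com/artemious7/TddKatas | DiversionPy/Diversion.py | naive_approach
-- ===== SOURCE A (Python) =====
-- def naive_approach(sequenceLength: int):
--
--     def all_permutations():
--         if sequenceLength == 0:
--             return [""]
--         return [format(x, "b") for x in range(2**sequenceLength)]
--
--     return len(
--         [permutation for permutation in all_permutations() if "11" not in permutation]
--     )
-- ===== SOURCE B (Python) =====
-- def naive_approach(sequenceLength: int):
--     # The count of binary strings of this length with no adjacent 1-bits is
--     # a Fibonacci number: F(sequenceLength) + F(sequenceLength + 1).
--     # Compute the pair by fast doubling.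
--     def fib_pair(k):
--         # returns (F(k), F(k + 1))
--         if k == 0:
--             return (0, 1)
--         a, b = fib_pair(k // 2)
--         c = a * (2 * b - a)
--         d = a * a + b * b
--         if k % 2 == 0:
--             return (c, d)
--         else:
--             return (d, c + d)
--
--     a, b = fib_pair(sequenceLength)
--     return a + b
-- ===== Notes on version B (the rewrite author's own statement) =====
-- stated objective: faster
-- what changed: Replaces the exhaustive enumeration of every binary string with a substring test by the fast-doubling Fibonacci recursion (the count obeys the Fibonacci recurrence); intended as faster, though a timing run could not confirm a ratio because A already times out at the smallest probe sizes.
import Mathlib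
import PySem

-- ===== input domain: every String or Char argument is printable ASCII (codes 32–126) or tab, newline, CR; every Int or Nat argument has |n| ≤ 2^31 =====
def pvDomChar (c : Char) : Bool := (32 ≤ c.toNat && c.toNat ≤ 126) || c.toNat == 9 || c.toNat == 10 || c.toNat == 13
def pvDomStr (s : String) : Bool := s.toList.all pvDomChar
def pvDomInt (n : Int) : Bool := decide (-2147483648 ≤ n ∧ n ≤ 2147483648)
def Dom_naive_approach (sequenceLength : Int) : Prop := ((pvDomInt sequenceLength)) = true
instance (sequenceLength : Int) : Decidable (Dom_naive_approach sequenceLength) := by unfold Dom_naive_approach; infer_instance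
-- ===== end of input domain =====

-- B computes the count by the fast-doubling Fibonacci recursion instead of enumerating and filtering every binary string.

-- ===== PORT A =====
-- format(x, "b") for x ≥ 1: binary digits, most significant first (hand port, exact for Nat)
def pvBinChars (x : Nat) : List Char :=
  if h : x = 0 then []
  else pvBinChars (x / 2) ++ [if x % 2 = 1 then '1' else '0']
decreasing_by exact Nat.div_lt_self (Nat.pos_of_ne_zero h) (by omega)

-- format(x, "b") (x ≥ 0): "0" for 0, else its binary digits
def pvFormatB (x : Nat) : String := if x = 0 then "0" else String.ofList (pvBinChars x)

def naive_approach (sequenceLength : Int) : Int :=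
  let perms : List String :=
    if sequenceLength = 0 then [""]
    else (List.range (2 ^ sequenceLength.toNat)).map (fun x => pvFormatB x)
  ((perms.filter (fun p => !(PySem.Str.isIn "11" p))).length : Int)

-- ===== PORT B =====
-- fib_pair(k) = (F(k), F(k+1)) by fast doubling; the fuel argument only makes the
-- recursion total in Lean (it is never exhausted when fuel > k ≥ 0, the only calls made)
def fibPair (fuel : Nat) (k : Int) : Int × Int :=
  match fuel with
  | 0 => (0, 1)
  | f + 1 =>
    if k = 0 then (0, 1)
    else
      let p := fibPair f (PySem.Int.floordiv k 2)
      let c := p.1 * (2 * p.2 - p.1)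
      let d := p.1 * p.1 + p.2 * p.2
      if PySem.Int.mod k 2 = 0 then (c, d) else (d, c + d)

def naive_approach_alt (sequenceLength : Int) : Int :=
  let p := fibPair (sequenceLength.toNat + 1) sequenceLength
  p.1 + p.2

-- ===== PRECONDITION & SPEC =====
-- Pre_ excludes negative sequenceLength, where 2**sequenceLength is a float and range() raises TypeError in A.
def Pre_naive_approach (sequenceLength : Int) : Prop := 0 ≤ sequenceLength
instance (sequenceLength : Int) : Decidable (Pre_naive_approach sequenceLength) := by unfold Pre_naive_approach; infer_instance
def pvWitness_naive_approach : Int := (3)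

def Spec_naive_approach (sequenceLength : Int) (out : Int) : Prop := out = naive_approach_alt sequenceLength
instance (sequenceLength : Int) (out : Int) : Decidable (Spec_naive_approach sequenceLength out) := by unfold Spec_naive_approach; infer_instance

-- ===== CLAIM (what is proved, stated in full; the proofs are below) =====
def Claim_equal_naive_approach : Prop := ∀ (sequenceLength : Int), Dom_naive_approach sequenceLength → Pre_naive_approach sequenceLength → Spec_naive_approach sequenceLength (naive_approach sequenceLength)

-- ===== LEMMAS AND PROOFS =====

-- numeric "no adjacent 1-bits" predicate
def goodN : Nat → Bool
  | 0 => true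
  | x + 1 => if (x + 1) % 4 = 3 then false else goodN ((x + 1) / 2)
decreasing_by exact Nat.div_lt_self (by omega) (by omega)

lemma goodN_zero : goodN 0 = true := by rw [goodN]

lemma goodN_pos (x : Nat) (hx : 0 < x) :
    goodN x = if x % 4 = 3 then false else goodN (x / 2) := by
  match x, hx with
  | x + 1, _ => rw [goodN]

lemma goodN_one : goodN 1 = true := by
  rw [goodN_pos 1 (by omega)]; norm_num [goodN_zero]

lemma goodN_two : goodN 2 = true := by
  rw [goodN_pos 2 (by omega)]; norm_num [goodN_one]

lemma goodN_three : goodN 3 = false := by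
  rw [goodN_pos 3 (by omega)]; norm_num

-- adjacency test on char lists
def has11 : List Char → Bool
  | [] => false
  | a :: t => (a == '1' && t.head? == some '1') || has11 t

lemma infix_iff_has11 (l : List Char) : ['1', '1'] <:+: l ↔ has11 l = true := by
  induction l with
  | nil => simp [has11]
  | cons a t ih =>
    rw [List.infix_cons_iff, has11]
    constructor
    · rintro (hpre | hinf)
      · rcases hpre with ⟨r, hr⟩
        cases t with
        | nil => simp at hr
        | cons b t' =>
          simp only [List.cons_append] at hr
          obtain ⟨rfl, rfl, -⟩ : a = '1' ∧ b = '1' ∧ t' = [] ++ r := by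
            injection hr with h1 h2; injection h2 with h3 h4; exact ⟨h1.symm, h3.symm, h4.symm⟩
          simp
      · simp [ih.mp hinf]
    · intro h
      rcases Bool.or_eq_true_iff.mp h with h | h
      · left
        rcases Bool.and_eq_true_iff.mp h with ⟨h1, h2⟩
        cases t with
        | nil => simp at h2
        | cons b t' =>
          simp only [List.head?] at h2
          refine ⟨t', ?_⟩
          simp only [beq_iff_eq] at h1
          have : b = '1' := by simpa using h2
          simp [h1, this]
      · exact Or.inr (ih.mpr h)

lemma has11_append_singleton (l : List Char) (c : Char) :
    has11 (l ++ [c]) = (has11 l || (l.getLast? == some '1' && c == '1')) := by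
  induction l with
  | nil => simp [has11]
  | cons a t ih =>
    cases t with
    | nil => simp [has11]
    | cons b t' =>
      simp only [List.cons_append, has11] at *
      rw [ih]
      cases t' <;> simp [List.getLast?] <;> cases (a == '1') <;> cases (b == '1') <;> simp

lemma pvBinChars_spec (x : Nat) (hx : 0 < x) :
    has11 (pvBinChars x) = !goodN x ∧
    (pvBinChars x).getLast? = some (if x % 2 = 1 then '1' else '0') := by
  induction x using Nat.strong_induction_on with
  | _ x ih =>
    rw [pvBinChars]
    have hxne : ¬ x = 0 := by omega
    simp only [hxne, dif_neg, not_false_iff]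
    rw [has11_append_singleton, goodN_pos x hx]
    by_cases h2 : x / 2 = 0
    · have hx1 : x = 1 := by omega
      subst hx1
      simp [pvBinChars, has11, goodN]
    · have hlt : x / 2 < x := Nat.div_lt_self hx (by omega)
      obtain ⟨ih1, ih2⟩ := ih (x / 2) hlt (by omega)
      rw [ih1, ih2]
      constructor
      · have hm4 : x % 4 = 3 ↔ (x % 2 = 1 ∧ (x / 2) % 2 = 1) := by omega
        by_cases hc : x % 4 = 3
        · obtain ⟨ha, hb⟩ := hm4.mp hc
          simp [hc, ha, hb]
        · simp only [hc, if_false]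
          rcases Nat.mod_two_eq_zero_or_one x with ha | ha <;>
            rcases Nat.mod_two_eq_zero_or_one (x / 2) with hb | hb <;>
            simp [ha, hb] <;> omega
      · simp

lemma isIn_eq_has11 (s : String) : PySem.Str.isIn "11" s = has11 s.toList := by
  have h1 : PySem.Str.isIn "11" s = true ↔ has11 s.toList = true := by
    rw [PySem.Str.isIn_iff_infix]
    rw [show ("11" : String).toList = ['1', '1'] from rfl]
    exact infix_iff_has11 s.toList
  cases hh : has11 s.toList
  · exact Bool.eq_false_iff.mpr (fun hc => by rw [h1.mp hc] at hh; exact absurd hh (by simp))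
  · exact h1.mpr hh

lemma not_isIn_eq_goodN (x : Nat) :
    (!(PySem.Str.isIn "11" (pvFormatB x))) = goodN x := by
  unfold pvFormatB
  by_cases hx : x = 0
  · subst hx
    rw [if_pos rfl, isIn_eq_has11, goodN_zero]
    rfl
  · rw [if_neg hx, isIn_eq_has11]
    rw [show (String.ofList (pvBinChars x)).toList = pvBinChars x from String.toList_ofList]
    rw [(pvBinChars_spec x (by omega)).1, Bool.not_not]

-- the count of good numbers below 2^m
def C (m : Nat) : Nat := (List.range (2 ^ m)).countP (fun x => goodN x)

lemma goodN_shift : ∀ m y, y < 2 ^ m →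
    goodN (2 ^ m + y) = (goodN y && decide (2 * y < 2 ^ m)) := by
  intro m
  induction m using Nat.strong_induction_on with
  | _ m ih =>
    match m with
    | 0 =>
      intro y hy; interval_cases y
      norm_num [goodN_one, goodN_zero]
    | 1 =>
      intro y hy; interval_cases y
      · norm_num [goodN_two, goodN_zero]
      · norm_num [goodN_three, goodN_one]
    | (k + 2) =>
      intro y hy
      have hx : 0 < 2 ^ (k + 2) + y := by positivity
      rw [goodN_pos _ hx]
      have h4 : (2 ^ (k + 2) + y) % 4 = y % 4 := by
        have : 2 ^ (k + 2) = 4 * 2 ^ k := by ring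
        omega
      have hdiv : (2 ^ (k + 2) + y) / 2 = 2 ^ (k + 1) + y / 2 := by
        have : 2 ^ (k + 2) = 2 * 2 ^ (k + 1) := by ring
        omega
      rw [h4, hdiv, ih (k + 1) (by omega) (y / 2) (by
        have : 2 ^ (k + 2) = 2 * 2 ^ (k + 1) := by ring
        omega)]
      have hdec : decide (2 * (y / 2) < 2 ^ (k + 1)) = decide (2 * y < 2 ^ (k + 2)) := by
        have h1 : 2 ^ (k + 2) = 2 * 2 ^ (k + 1) := by ring
        have h2 : 2 ^ (k + 1) % 2 = 0 := by
          have : 2 ^ (k + 1) = 2 * 2 ^ k := by ring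
          omega
        by_cases h : 2 * y < 2 ^ (k + 2) <;> simp [h] <;> omega
      rw [hdec]
      by_cases hy0 : y = 0
      · subst hy0; simp [goodN_zero]
      · rw [goodN_pos y (by omega)]
        have hm4 : y % 4 = 3 ↔ (y % 2 = 1 ∧ (y / 2) % 2 = 1) := by omega
        by_cases hc : y % 4 = 3 <;> simp [hc]

lemma countP_restrict (p : Nat → Bool) (k n : Nat) (hk : k ≤ n) :
    (List.range n).countP (fun y => p y && decide (y < k)) = (List.range k).countP p := by
  have : n = k + (n - k) := by omega
  rw [this, List.range_add, List.countP_append]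
  have h1 : (List.range k).countP (fun y => p y && decide (y < k)) = (List.range k).countP p := by
    apply List.countP_congr
    intro y hy
    simp only [List.mem_range] at hy
    simp [hy]
  have h2 : ((List.range (n - k)).map (fun j => k + j)).countP (fun y => p y && decide (y < k)) = 0 := by
    rw [List.countP_map]
    apply List.countP_eq_zero.mpr
    intro j hj
    simp
  rw [h1, h2]
  omega

lemma C_rec (m : Nat) : C (m + 2) = C (m + 1) + C m := by
  unfold C
  have hsplit : (2 : Nat) ^ (m + 2) = 2 ^ (m + 1) + 2 ^ (m + 1) := by ring
  rw [hsplit, List.range_add, List.countP_append, List.countP_map]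
  congr 1
  have e1 : ((List.range (2 ^ (m + 1))).countP ((fun x => goodN x) ∘ fun j => 2 ^ (m + 1) + j)) =
      (List.range (2 ^ (m + 1))).countP (fun y => goodN y && decide (y < 2 ^ m)) := by
    apply List.countP_congr
    intro y hy
    simp only [List.mem_range] at hy
    have hs := goodN_shift (m + 1) y hy
    have h2 : decide (2 * y < 2 ^ (m + 1)) = decide (y < 2 ^ m) := by
      have hp : (2 : Nat) ^ (m + 1) = 2 * 2 ^ m := by ring
      by_cases h : y < 2 ^ m <;> simp [h] <;> omega
    simp only [Function.comp_apply, hs, h2]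
  rw [e1]
  exact countP_restrict _ _ _ (by
    have : (2 : Nat) ^ (m + 1) = 2 * 2 ^ m := by ring
    omega)

-- the fast-doubling helper computes Fibonacci pairs
lemma fibPair_spec (fuel : Nat) : ∀ k : Int, 0 ≤ k → k.toNat < fuel →
    fibPair fuel k = ((Nat.fib k.toNat : Int), (Nat.fib (k.toNat + 1) : Int)) := by
  induction fuel with
  | zero => intro k _ h; omega
  | succ f ih =>
    intro k hk hlt
    rw [fibPair]
    by_cases h0 : k = 0
    · subst h0; simp
    · rw [if_neg h0]
      have hm : k = (k.toNat : Int) := by omega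
      set m := k.toNat with hmdef
      have hfd : PySem.Int.floordiv k 2 = ((m / 2 : Nat) : Int) := by
        rw [hm]; exact_mod_cast PySem.Int.floordiv_natCast m 2
      have hmod : PySem.Int.mod k 2 = ((m % 2 : Nat) : Int) := by
        rw [hm]; exact_mod_cast PySem.Int.mod_natCast m 2
      have hrec := ih ((m / 2 : Nat) : Int) (by positivity) (by simp; omega)
      rw [hfd, hrec, hmod]
      simp only [Int.toNat_natCast]
      set t := m / 2 with htdef
      have hNat : Nat.fib t ≤ 2 * Nat.fib (t + 1) :=
        le_trans (Nat.fib_le_fib_succ) (by omega)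
      rcases Nat.even_or_odd m with he | ho
      · have he2 : m % 2 = 0 := Nat.even_iff.mp he
        have h2 : m = 2 * t := by omega
        have hfib1 : (Nat.fib m : Int) =
            (Nat.fib t : Int) * (2 * (Nat.fib (t + 1) : Int) - (Nat.fib t : Int)) := by
          rw [h2, Nat.fib_two_mul]
          push_cast [Nat.cast_sub hNat]
          ring
        have hfib2 : (Nat.fib (m + 1) : Int) =
            (Nat.fib (t + 1) : Int) ^ 2 + (Nat.fib t : Int) ^ 2 := by
          rw [show m + 1 = 2 * t + 1 by omega, Nat.fib_two_mul_add_one]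
          push_cast
          ring
        rw [if_pos (by simp [he2])]
        refine Prod.ext ?_ ?_ <;> simp [hfib1, hfib2] <;> ring
      · have ho2 : m % 2 = 1 := Nat.odd_iff.mp ho
        have h2 : m = 2 * t + 1 := by omega
        have hfib1 : (Nat.fib m : Int) =
            (Nat.fib (t + 1) : Int) ^ 2 + (Nat.fib t : Int) ^ 2 := by
          rw [h2, Nat.fib_two_mul_add_one]; push_cast; ring
        have hfib2 : (Nat.fib (m + 1) : Int) =
            (Nat.fib t : Int) * (2 * (Nat.fib (t + 1) : Int) - (Nat.fib t : Int))
            + ((Nat.fib (t + 1) : Int) ^ 2 + (Nat.fib t : Int) ^ 2) := by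
          rw [show m + 1 = 2 * t + 1 + 1 by omega]
          rw [Nat.fib_add_two (n := 2 * t), Nat.fib_two_mul, Nat.fib_two_mul_add_one]
          push_cast [Nat.cast_sub hNat]
          ring
        rw [if_neg (by simp [ho2])]
        refine Prod.ext ?_ ?_ <;> simp [hfib1, hfib2] <;> ring

-- the counting recurrence is Fibonacci's: C m = F(m + 2)
lemma C_eq_fib : ∀ m, C m = Nat.fib (m + 2) ∧ C (m + 1) = Nat.fib (m + 3) := by
  intro m
  induction m with
  | zero =>
    constructor
    · show (List.range 1).countP (fun x => goodN x) = Nat.fib 2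
      rw [show List.range 1 = [0] from rfl]
      simp [goodN_zero]
    · show (List.range 2).countP (fun x => goodN x) = Nat.fib 3
      rw [show List.range 2 = [0, 1] from rfl]
      simp [goodN_zero, goodN_one]
      decide
  | succ m ih =>
    refine ⟨ih.2, ?_⟩
    rw [C_rec m, ih.1, ih.2, show m + 1 + 3 = m + 2 + 2 from by ring,
      Nat.fib_add_two (n := m + 2), show m + 2 + 1 = m + 3 from by ring]
    exact Nat.add_comm _ _

-- ===== VERDICT (by name: the statement is the Claim_ definition above) =====
theorem naive_approach_spec : Claim_equal_naive_approach := by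
  intro n _ hpre
  have hn : 0 ≤ n := hpre
  unfold Spec_naive_approach naive_approach naive_approach_alt
  have halt : (fibPair (n.toNat + 1) n).1 + (fibPair (n.toNat + 1) n).2
      = (Nat.fib (n.toNat + 2) : Int) := by
    rw [fibPair_spec (n.toNat + 1) n hn (by omega), Nat.fib_add_two]
    push_cast
    ring
  show _ = (fibPair (n.toNat + 1) n).1 + (fibPair (n.toNat + 1) n).2
  rw [halt, ← (C_eq_fib n.toNat).1]
  by_cases h0 : n = 0
  · subst h0
    rw [if_pos rfl]
    rw [show C (Int.toNat 0) = 1 by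
      show (List.range 1).countP (fun x => goodN x) = 1
      rw [show List.range 1 = [0] from rfl]
      simp [goodN_zero]]
    decide
  · simp only [h0, if_false]
    rw [List.filter_map, List.length_map, ← List.countP_eq_length_filter]
    have hcount : (List.range (2 ^ n.toNat)).countP
        ((fun p => !(PySem.Str.isIn "11" p)) ∘ fun x => pvFormatB x) = C n.toNat := by
      unfold C
      apply List.countP_congr
      intro y _
      rw [show ((fun p => !(PySem.Str.isIn "11" p)) ∘ fun x => pvFormatB x) y
          = (!(PySem.Str.isIn "11" (pvFormatB y))) from rfl, not_isIn_eq_goodN y]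
    rw [hcount]
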